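-- pv_equiv track=rewrite | github.com/Korisss/text-analysis | text_processor.py | count_sounds
-- ===== SOURCE A (Python) =====
-- def count_sounds(tokens: list[str]) -> dict[str, int]:
--     sounds_count = dict[str, int]()
--
--     previous_letter = ''
--     for token in tokens:
--         for letter in token:
--             if letter == '\'' and previous_letter != '':
--                 if f'{previous_letter}\'' not in sounds_count:
--                     sounds_count[f'{previous_letter}\''] = 0
--                 sounds_count[f'{previous_letter}\''] += 1
--                 sounds_count[previous_letter] -= 1
--             else:
--                 if letter not in sounds_count:
--                     sounds_count[letter] = 0
--                 sounds_count[letter] += 1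
--
--             previous_letter = letter
--
--     return sounds_count
-- ===== SOURCE B (Python) =====
-- def count_sounds(tokens: list[str]) -> dict[str, int]:
--     # Split the flattened text on apostrophes: each boundary between adjacent
--     # segments is one apostrophe event, so no per-character state is needed.
--     counts = {}
--     parts = "".join(tokens).split("'")
--     last = len(parts) - 1
--     for j, part in enumerate(parts):
--         for ch in part:
--             counts[ch] = counts.get(ch, 0) + 1
--         if j == last:
--             break
--         if part:
--             prev = part[-1]
--         elif j > 0:
--             prev = "'"
--         else:
--             # the very first character of the text is an apostrophe: plain count
--             counts["'"] = counts.get("'", 0) + 1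
--             continue
--         counts[prev + "'"] = counts.get(prev + "'", 0) + 1
--         counts[prev] = counts.get(prev, 0) - 1
--     return counts
-- ===== Notes on version B (the rewrite author's own statement) =====
-- stated objective: alternative
-- what changed: B replaces A's per-character scan with threaded previous_letter state by a split-based algorithm: it splits the flattened text on apostrophes, counts the characters of each segment plainly, and processes each segment boundary as one apostrophe event (prev = last char of the segment, or "'" for an empty non-initial segment, or a plain apostrophe at the very start).
import Mathlib
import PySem

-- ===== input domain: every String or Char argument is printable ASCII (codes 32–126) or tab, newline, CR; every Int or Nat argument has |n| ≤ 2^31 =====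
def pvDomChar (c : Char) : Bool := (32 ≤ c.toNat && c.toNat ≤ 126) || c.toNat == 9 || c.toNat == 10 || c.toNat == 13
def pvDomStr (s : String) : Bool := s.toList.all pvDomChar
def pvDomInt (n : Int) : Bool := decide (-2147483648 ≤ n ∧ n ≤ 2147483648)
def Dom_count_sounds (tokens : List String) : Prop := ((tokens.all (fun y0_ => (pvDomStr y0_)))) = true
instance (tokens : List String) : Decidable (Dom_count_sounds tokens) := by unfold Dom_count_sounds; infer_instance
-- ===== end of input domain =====

-- B splits the flattened text on apostrophes and counts per segment, handling each
-- segment boundary as one apostrophe event (objective: alternative algorithm).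


-- ===== PORT A =====
-- `if key not in d: d[key] = 0 ; d[key] += 1`
def pvBump (d : PySem.Dict String Int) (k : String) : PySem.Dict String Int :=
  let d1 := if d.contains k then d else d.insert k 0
  d1.insert k (d1.getD k 0 + 1)

-- body of A's inner loop; state = (sounds_count, previous_letter)
def pvStepA (st : PySem.Dict String Int × String) (letter : Char) :
    PySem.Dict String Int × String :=
  if letter = '\'' ∧ st.2 ≠ "" then
    let key := st.2 ++ "'"
    let d := pvBump st.1 key
    -- Python's `sounds_count[previous_letter] -= 1` raises KeyError when the key is
    -- absent; Pre_ excludes those inputs, getD 0 merely totalizes the port there.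
    (d.insert st.2 (d.getD st.2 0 - 1), String.singleton letter)
  else
    (pvBump st.1 (String.singleton letter), String.singleton letter)

def count_sounds (tokens : List String) : List (String × Int) :=
  (tokens.foldl (fun st token => token.toList.foldl pvStepA st)
      (PySem.Dict.empty, "")).1.items

-- ===== PORT B =====
-- `counts[k] = counts.get(k, 0) + v`
def pvBumpB (d : PySem.Dict String Int) (k : String) (v : Int) : PySem.Dict String Int :=
  d.insert k (d.getD k 0 + v)

-- Source B's loop over the split parts; `first` = (j == 0), `rest = []` = (j == last)
def pvGoB (first : Bool) (d : PySem.Dict String Int) : List String → PySem.Dict String Int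
  | [] => d
  | part :: rest =>
    let d1 := part.toList.foldl (fun d c => pvBumpB d (String.singleton c) 1) d
    match rest with
    | [] => d1
    | _ :: _ =>
      -- `if part: prev = part[-1]  elif j > 0: prev = "'"  else: count "'" and continue`
      let prevOpt : Option String :=
        match part.toList.getLast? with
        | some c => some (String.singleton c)
        | none => if first then none else some "'"
      match prevOpt with
      | some prev => pvGoB false (pvBumpB (pvBumpB d1 (prev ++ "'") 1) prev (-1)) rest
      | none => pvGoB false (pvBumpB d1 "'" 1) rest

def count_sounds_alt (tokens : List String) : List (String × Int) :=
  -- `"".join(tokens).split("'")`; split? is `some` here since the separator is non-empty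
  let parts := (PySem.Str.split? (PySem.Str.join "" tokens) "'").getD []
  (pvGoB true PySem.Dict.empty parts).items

-- ===== PRECONDITION & SPEC =====
def pvChars (tokens : List String) : List Char := (tokens.map String.toList).flatten

-- Pre_ excludes exactly the inputs on which A raises KeyError: those whose flattened
-- character stream has two consecutive apostrophes at some position ≥ 1 while not
-- starting with an apostrophe (A then decrements the count of a never-counted "'").
-- B returns a value there (the "'" entry simply goes negative via get(key, 0)).
def Pre_count_sounds (tokens : List String) : Prop :=
  ¬ ((∃ i : Fin (pvChars tokens).length, 2 ≤ i.1 ∧ (pvChars tokens).get i = '\'' ∧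
        (pvChars tokens).getD (i.1 - 1) ' ' = '\'') ∧
      (pvChars tokens).getD 0 ' ' ≠ '\'')
instance (tokens : List String) : Decidable (Pre_count_sounds tokens) := by
  unfold Pre_count_sounds; infer_instance

def pvWitness_count_sounds : List String := ["ab'", "c"]
def Spec_count_sounds (tokens : List String) (out : List (String × Int)) : Prop := out = count_sounds_alt tokens
instance (tokens : List String) (out : List (String × Int)) : Decidable (Spec_count_sounds tokens out) := by unfold Spec_count_sounds; infer_instance

-- ===== CLAIM (what is proved, stated in full; the proofs are below) =====
def Claim_equal_count_sounds : Prop := ∀ (tokens : List String), Dom_count_sounds tokens → Pre_count_sounds tokens → Spec_count_sounds tokens (count_sounds tokens)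

-- ===== LEMMAS AND PROOFS =====

-- reference splitter: pvSplit pre cs = the parts of pre ++ cs split on apostrophes,
-- where pre (apostrophe-free) is the piece of the current part already consumed
def pvSplit (pre : List Char) : List Char → List (List Char)
  | [] => [pre]
  | c :: rest => if c = '\'' then pre :: pvSplit [] rest else pvSplit (pre ++ [c]) rest

-- joining back with apostrophes
def pvJoin : List (List Char) → List Char
  | [] => []
  | [p] => p
  | p :: q :: r => p ++ '\'' :: pvJoin (q :: r)

theorem pvSplit_ne_nil (cs pre : List Char) : pvSplit pre cs ≠ [] := by
  induction cs generalizing pre with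
  | nil => simp [pvSplit]
  | cons c rest ih =>
    simp only [pvSplit]
    split_ifs
    · simp
    · exact ih _

theorem pvJoin_pvSplit (cs : List Char) : ∀ pre, pvJoin (pvSplit pre cs) = pre ++ cs := by
  induction cs with
  | nil => intro pre; simp [pvSplit, pvJoin]
  | cons c rest ih =>
    intro pre
    simp only [pvSplit]
    split_ifs with hc
    · subst hc
      have h := pvSplit_ne_nil rest []
      cases hsp : pvSplit [] rest with
      | nil => exact absurd hsp h
      | cons q r =>
        have h2 := ih []
        rw [hsp] at h2
        simp only [List.nil_append] at h2
        simp [pvJoin, h2]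
    · rw [ih (pre ++ [c])]; simp

theorem pvSplit_no_apo (cs : List Char) : ∀ pre, '\'' ∉ pre →
    ∀ p ∈ pvSplit pre cs, '\'' ∉ p := by
  induction cs with
  | nil => intro pre h p hp; simp [pvSplit] at hp; subst hp; exact h
  | cons c rest ih =>
    intro pre h p hp
    simp only [pvSplit] at hp
    split_ifs at hp with hc
    · rcases List.mem_cons.mp hp with h1 | h1
      · subst h1; exact h
      · exact ih [] (by simp) p h1
    · exact ih (pre ++ [c]) (by simp [h, Ne.symm hc]) p hp

theorem pv_go_eq (fuel : Nat) : ∀ (l cur : List Char) (accs : List (List Char)),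
    l.length < fuel →
    PySem.Chars.splitOn.go ['\''] fuel l cur accs = accs.reverse ++ pvSplit cur.reverse l := by
  induction fuel with
  | zero => intro l _ _ h; omega
  | succ f ih =>
    intro l cur accs h
    cases l with
    | nil => simp [PySem.Chars.splitOn.go, pvSplit]
    | cons c rest =>
      simp only [PySem.Chars.splitOn.go, List.isPrefixOf]
      by_cases hc : c = '\''
      · subst hc
        simp only [beq_self_eq_true, if_pos, Bool.and_true]
        rw [show List.drop (['\''] : List Char).length ('\'' :: rest) = rest from rfl]
        rw [ih rest [] (cur.reverse :: accs) (by simpa using Nat.lt_of_succ_lt_succ (by simpa using h))]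
        simp [pvSplit]
      · have hbeq : ('\'' == c) = false := by simp [Ne.symm hc]
        simp only [hbeq, Bool.false_and, Bool.false_eq_true, if_false]
        rw [ih rest (c :: cur) accs (by simpa using Nat.lt_of_succ_lt_succ (by simpa using h))]
        simp [pvSplit, hc]

theorem pv_splitOn_eq (cs : List Char) :
    PySem.Chars.splitOn cs ['\''] = pvSplit [] cs := by
  unfold PySem.Chars.splitOn
  rw [pv_go_eq (cs.length + 1) cs [] [] (by omega)]
  simp

theorem pvBump_eq (d : PySem.Dict String Int) (k : String) :
    pvBump d k = pvBumpB d k 1 := by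
  unfold pvBump pvBumpB
  by_cases h : d.contains k = true
  · simp [h]
  · have h0 : d.getD k 0 = 0 :=
      PySem.Dict.getD_of_not_contains d 0 (by simp [h])
    simp [h, PySem.Dict.insert_insert_self, PySem.Dict.getD_insert_self, h0]

theorem pv_singleton_ne_empty (c : Char) : String.singleton c ≠ "" := by
  intro h
  have : (String.singleton c).toList = ("" : String).toList := by rw [h]
  simp [String.singleton] at this

def pvLastStr (p : List Char) (pr : String) : String :=
  match p.getLast? with
  | none => pr
  | some c => String.singleton c

theorem pv_seg (p : List Char) : ∀ (d : PySem.Dict String Int) (pr : String), '\'' ∉ p →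
    p.foldl pvStepA (d, pr)
      = (p.foldl (fun d c => pvBumpB d (String.singleton c) 1) d, pvLastStr p pr) := by
  induction p with
  | nil => intro d pr _; simp [pvLastStr]
  | cons c rest ih =>
    intro d pr h
    have hc : c ≠ '\'' := fun hc => h (hc ▸ List.mem_cons_self)
    have hstep : pvStepA (d, pr) c = (pvBumpB d (String.singleton c) 1, String.singleton c) := by
      unfold pvStepA
      rw [if_neg (by simp [hc])]
      simp [pvBump_eq]
    have hlast : pvLastStr (c :: rest) pr = pvLastStr rest (String.singleton c) := by
      cases rest with
      | nil => simp [pvLastStr]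
      | cons r rs =>
        unfold pvLastStr
        rw [List.getLast?_cons_cons]
        cases hx : (r :: rs).getLast? with
        | none => exact absurd (List.getLast?_eq_none_iff.mp hx) (by simp)
        | some x => rfl
    simp only [List.foldl_cons, hstep, hlast]
    exact ih _ _ (fun hm => h (List.mem_cons_of_mem _ hm))

theorem pv_main (parts : List String) : ∀ (d : PySem.Dict String Int) (first : Bool),
    parts ≠ [] → (∀ p ∈ parts, '\'' ∉ p.toList) →
    ((pvJoin (parts.map String.toList)).foldl pvStepA
        (d, if first then "" else "'")).1 = pvGoB first d parts := by
  induction parts with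
  | nil => intro _ _ h _; exact absurd rfl h
  | cons p rest ih =>
    intro d first _ hno
    have hp : '\'' ∉ p.toList := hno p List.mem_cons_self
    cases rest with
    | nil =>
      simp only [List.map, pvJoin]
      rw [pv_seg p.toList d _ hp]
      simp [pvGoB]
    | cons q r =>
      have hjoin : pvJoin ((p :: q :: r).map String.toList)
          = p.toList ++ '\'' :: pvJoin ((q :: r).map String.toList) := by
        simp [pvJoin]
      rw [hjoin, List.foldl_append]
      rw [pv_seg p.toList d _ hp]
      simp only [List.foldl_cons]
      have hno' : ∀ x ∈ q :: r, '\'' ∉ x.toList :=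
        fun x hx => hno x (List.mem_cons_of_mem _ hx)
      have ih' : ∀ d2 : PySem.Dict String Int,
          (List.foldl pvStepA (d2, "'") (pvJoin ((q :: r).map String.toList))).1
            = pvGoB false d2 (q :: r) := by
        intro d2
        simpa using ih d2 false (by simp) hno'
      have hsing : String.singleton '\'' = "'" := rfl
      -- the single apostrophe step
      cases hlast : p.toList.getLast? with
      | some c =>
        have hpr : pvLastStr p.toList (if first then "" else "'") = String.singleton c := by
          unfold pvLastStr; rw [hlast]
        have hstep : pvStepA
            (p.toList.foldl (fun d c => pvBumpB d (String.singleton c) 1) d,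
              pvLastStr p.toList (if first then "" else "'")) '\''
            = (pvBumpB (pvBumpB
                (p.toList.foldl (fun d c => pvBumpB d (String.singleton c) 1) d)
                (String.singleton c ++ "'") 1) (String.singleton c) (-1), "'") := by
          rw [hpr]
          unfold pvStepA
          rw [if_pos ⟨rfl, pv_singleton_ne_empty c⟩]
          simp only [hsing, pvBump_eq]
          unfold pvBumpB
          simp [sub_eq_add_neg]
        rw [hstep, ih' _]
        simp [pvGoB, hlast]
      | none =>
        have hpr : ∀ b : Bool, pvLastStr p.toList (if b then "" else "'")
            = (if b then "" else "'") := by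
          intro b; unfold pvLastStr; rw [hlast]
        cases first with
        | true =>
          have hstep : pvStepA
              (p.toList.foldl (fun d c => pvBumpB d (String.singleton c) 1) d,
                pvLastStr p.toList (if true then "" else "'")) '\''
              = (pvBumpB (p.toList.foldl (fun d c => pvBumpB d (String.singleton c) 1) d)
                  "'" 1, "'") := by
            rw [hpr]
            unfold pvStepA
            rw [if_neg (by simp)]
            simp [hsing, pvBump_eq]
          rw [hstep, ih' _]
          simp [pvGoB, hlast]
        | false =>
          have hne2 : ("'" : String) ≠ "" := by decide
          have hstep : pvStepA
              (p.toList.foldl (fun d c => pvBumpB d (String.singleton c) 1) d,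
                pvLastStr p.toList (if false then "" else "'")) '\''
              = (pvBumpB (pvBumpB
                  (p.toList.foldl (fun d c => pvBumpB d (String.singleton c) 1) d)
                  ("'" ++ "'") 1) "'" (-1), "'") := by
            rw [hpr]
            unfold pvStepA
            rw [if_pos ⟨rfl, hne2⟩]
            simp only [hsing, pvBump_eq]
            unfold pvBumpB
            simp [sub_eq_add_neg]
          rw [hstep, ih' _]
          simp [pvGoB, hlast]

theorem pv_toList_join (tokens : List String) :
    (PySem.Str.join "" tokens).toList = pvChars tokens := by
  rw [PySem.Str.toList_join]
  have h : ("" : String).toList = ([] : List Char) := rfl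
  rw [h]
  unfold pvChars
  generalize (tokens.map String.toList) = cs
  induction cs with
  | nil => simp [PySem.Chars.join_nil]
  | cons a t ih =>
    cases t with
    | nil => simp [PySem.Chars.join_singleton]
    | cons b t2 => rw [PySem.Chars.join_cons_cons]; simp [ih]

-- ===== VERDICT (by name: the statement is the Claim_ definition above) =====
theorem count_sounds_spec : Claim_equal_count_sounds := by
  intro tokens _ _
  unfold Spec_count_sounds count_sounds count_sounds_alt
  -- identify the split parts
  have hbridge := PySem.Str.split?_map (PySem.Str.join "" tokens) "'"
  rw [show ("'" : String).toList = ['\''] from rfl] at hbridge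
  rw [show PySem.Chars.split? (PySem.Str.join "" tokens).toList ['\'']
      = some (PySem.Chars.splitOn (PySem.Str.join "" tokens).toList ['\'']) from rfl] at hbridge
  cases hsp : PySem.Str.split? (PySem.Str.join "" tokens) "'" with
  | none => rw [hsp] at hbridge; simp at hbridge
  | some parts =>
    rw [hsp] at hbridge
    simp only [Option.map_some, Option.some.injEq] at hbridge
    rw [pv_splitOn_eq, pv_toList_join] at hbridge
    have hne : parts ≠ [] := by
      intro h; rw [h] at hbridge
      exact pvSplit_ne_nil (pvChars tokens) [] (by simpa using hbridge.symm)
    have hno : ∀ p ∈ parts, '\'' ∉ p.toList := by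
      intro p hp
      exact pvSplit_no_apo (pvChars tokens) [] (by simp) p.toList
        (hbridge ▸ List.mem_map_of_mem hp)
    have hjoin : pvJoin (parts.map String.toList) = pvChars tokens := by
      rw [hbridge, pvJoin_pvSplit]; simp
    have h1 : tokens.foldl (fun st token => token.toList.foldl pvStepA st)
        (PySem.Dict.empty, "") = (pvChars tokens).foldl pvStepA (PySem.Dict.empty, "") := by
      unfold pvChars
      rw [List.foldl_flatten, List.foldl_map]
    rw [h1]
    simp only [Option.getD_some]
    have hmain := pv_main parts PySem.Dict.empty true hne hno
    rw [hjoin] at hmain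
    norm_num at hmain
    rw [hmain]
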